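-- pv_equiv track=rewrite | github.com/fvckinfa/adventofcode2025 | code/day04.py | total_removed
-- ===== SOURCE A (Python) =====
-- from collections import deque
-- from typing import List, Tuple, Set
--
-- DIRS = [(-1,-1),(-1,0),(-1,1),
--         (0,-1),        (0,1),
--         (1,-1),(1,0),(1,1)]
--
-- def total_removed(grid: List[str]) -> int:
--     h = len(grid)
--     w = len(grid[0]) if h else 0
--
--     # store '@' as a set for O(1) membership and removals
--     papers: Set[Tuple[int,int]] = set()
--     for r in range(h):
--         row = grid[r]
--         for c in range(w):
--             if row[c] == "@":
--                 papers.add((r, c))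
--
--     # neighbor counts
--     neigh_cnt = {}
--     for r, c in papers:
--         cnt = 0
--         for dr, dc in DIRS:
--             rr, cc = r + dr, c + dc
--             if (rr, cc) in papers:
--                 cnt += 1
--         neigh_cnt[(r, c)] = cnt
--
--     q = deque([pos for pos, cnt in neigh_cnt.items() if cnt < 4])
--     removed = 0
--
--     while q:
--         pos = q.popleft()
--         if pos not in papers:
--             continue
--         if neigh_cnt[pos] >= 4:
--             continue
--
--         # remove it
--         papers.remove(pos)
--         removed += 1
--         r, c = pos
--
--         # update neighbors
--         for dr, dc in DIRS:
--             nb = (r + dr, c + dc)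
--             if nb in papers:
--                 neigh_cnt[nb] -= 1
--                 if neigh_cnt[nb] < 4:
--                     q.append(nb)
--
--     return removed
-- ===== SOURCE B (Python) =====
-- def total_removed(grid):
--     w = len(grid[0]) if grid else 0
--     papers = {(r, c) for r in range(len(grid)) for c in range(w) if grid[r][c] == "@"}
--     nbr = [(dr, dc) for dr in (-1, 0, 1) for dc in (-1, 0, 1) if dr or dc]
--     total = 0
--     while True:
--         peel = [p for p in papers if sum((p[0] + dr, p[1] + dc) in papers for dr, dc in nbr) < 4]
--         if not peel:
--             return total
--         papers.difference_update(peel)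
--         total += len(peel)
-- ===== Notes on version B (the rewrite author's own statement) =====
-- stated objective: simpler
-- what changed: A maintains a neighbor-count table and a work queue, removing papers one at a time with incremental count updates; B repeatedly rescans the remaining set and removes all papers with fewer than 4 neighbors in one round until a fixpoint, with no auxiliary table or queue.
import Mathlib
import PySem

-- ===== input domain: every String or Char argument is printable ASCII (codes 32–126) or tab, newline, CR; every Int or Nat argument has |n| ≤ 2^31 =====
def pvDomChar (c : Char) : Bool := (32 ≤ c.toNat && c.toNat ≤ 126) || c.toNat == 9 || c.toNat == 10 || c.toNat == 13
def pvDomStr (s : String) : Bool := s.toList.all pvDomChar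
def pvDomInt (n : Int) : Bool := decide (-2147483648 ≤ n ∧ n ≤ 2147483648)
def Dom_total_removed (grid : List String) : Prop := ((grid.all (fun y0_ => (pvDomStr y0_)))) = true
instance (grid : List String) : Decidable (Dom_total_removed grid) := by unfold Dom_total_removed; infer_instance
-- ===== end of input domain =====

-- B replaces A's neighbor-count table plus work queue by a simple round-based fixpoint
-- (each round simultaneously removes every paper with fewer than 4 neighbors); objective: simpler.

-- ===== PORT A =====
def DIRS : List (Int × Int) :=
  [(-1,-1),(-1,0),(-1,1),(0,-1),(0,1),(1,-1),(1,0),(1,1)]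

-- one iteration of A's 'for dr, dc in DIRS' neighbor-update loop body
def stepA (papers' : PySem.Set (Int × Int)) (pos : Int × Int)
    (s : PySem.Dict (Int × Int) Int × List (Int × Int)) (dd : Int × Int) :
    PySem.Dict (Int × Int) Int × List (Int × Int) :=
  let nb := (pos.1 + dd.1, pos.2 + dd.2)
  if papers'.contains nb then
    let c' := s.1.modify nb 0 (· - 1)
    if c'.getD nb 0 < 4 then (c', s.2 ++ [nb]) else (c', s.2)
  else s

lemma stepA_snd_len (papers' : PySem.Set (Int × Int)) (pos : Int × Int) :
    ∀ (ds : List (Int × Int)) (s : PySem.Dict (Int × Int) Int × List (Int × Int)),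
      (ds.foldl (stepA papers' pos) s).2.length ≤ s.2.length + ds.length := by
  intro ds
  induction ds with
  | nil => intro s; simp
  | cons d ds ih =>
    intro s
    have h := ih (stepA papers' pos s d)
    have : (stepA papers' pos s d).2.length ≤ s.2.length + 1 := by
      unfold stepA
      dsimp only
      split
      · split <;> simp
      · simp
    simpa [List.foldl] using h.trans (by omega)

lemma length_filter_lt {α : Type} (l : List α) (p : α → Bool) (x : α)
    (hx : x ∈ l) (hp : p x = false) : (l.filter p).length < l.length := by
  have h1 := List.length_eq_length_filter_add (l := l) p
  have h2 : 0 < (l.filter (fun a => !p a)).length :=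
    List.length_pos_of_mem (List.mem_filter.mpr ⟨hx, by simp [hp]⟩)
  omega

lemma length_discard_lt {s : PySem.Set (Int × Int)} {x : Int × Int}
    (h : x ∈ s) : (PySem.Set.discard s x).length < s.length :=
  length_filter_lt s _ x h (by simp)

-- A's main 'while q' loop
def loopA (papers : PySem.Set (Int × Int)) (cnt : PySem.Dict (Int × Int) Int)
    (q : List (Int × Int)) (removed : Int) : Int :=
  match q with
  | [] => removed
  | pos :: q' =>
    if hc : papers.contains pos = false then loopA papers cnt q' removed
    else if 4 ≤ cnt.getD pos 0 then loopA papers cnt q' removed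
    else
      let papers' := (PySem.Set.remove? papers pos).getD papers
      let s := DIRS.foldl (stepA papers' pos) (cnt, q')
      loopA papers' s.1 s.2 (removed + 1)
  termination_by 9 * papers.length + q.length
  decreasing_by
  · simp only [List.length_cons]; omega
  · simp only [List.length_cons]; omega
  · have hmem : pos ∈ papers := by simp at hc; exact hc
    have hrm : (papers.remove? pos).getD papers = PySem.Set.discard papers pos := by
      rw [PySem.Set.remove?_of_mem hmem]; rfl
    have h1 : ((papers.remove? pos).getD papers).length < papers.length := by
      rw [hrm]; exact length_discard_lt hmem
    have h2 : (List.foldl (stepA ((papers.remove? pos).getD papers) pos) (cnt, q') DIRS).2.length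
        ≤ q'.length + DIRS.length := stepA_snd_len ((papers.remove? pos).getD papers) pos DIRS (cnt, q')
    have h3 : DIRS.length = 8 := rfl
    simp only [List.length_cons]
    omega

def total_removed (grid : List String) : Int :=
  let h := grid.length
  let w : Int := if h ≠ 0 then PySem.Str.len grid.headI else 0
  let papers : PySem.Set (Int × Int) :=
    (PySem.List.pyRange 0 (h : Int)).foldl (fun pap r =>
      let row := (PySem.List.pyGet? grid r).getD ""
      (PySem.List.pyRange 0 w).foldl (fun pap c =>
        if PySem.Str.pyGet? row c == some '@' then PySem.Set.add pap (r, c) else pap) pap)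
      PySem.Set.empty
  let neigh_cnt : PySem.Dict (Int × Int) Int :=
    papers.foldl (fun d p =>
      d.insert p (DIRS.foldl (fun cnt dd =>
        if papers.contains (p.1 + dd.1, p.2 + dd.2) then cnt + 1 else cnt) (0 : Int))) PySem.Dict.empty
  let q := (neigh_cnt.items.filter (fun pc => pc.2 < 4)).map Prod.fst
  loopA papers neigh_cnt q 0

-- ===== PORT B =====
-- nbr = [(dr, dc) for dr in (-1, 0, 1) for dc in (-1, 0, 1) if dr or dc]
def NBR : List (Int × Int) :=
  [(-1 : Int), 0, 1].flatMap (fun dr =>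
    (([(-1 : Int), 0, 1]).filter (fun dc => !(dr == 0 && dc == 0))).map (fun dc => (dr, dc)))

-- B's 'while True' round loop: peel every paper with < 4 neighbors, stop when none peels
def loopB (papers : PySem.Set (Int × Int)) (total : Int) : Int :=
  let peel := papers.filter (fun p =>
    decide ((NBR.countP (fun d => papers.contains (p.1 + d.1, p.2 + d.2)) : Int) < 4))
  if peel.isEmpty then total
  else loopB (PySem.Set.diff papers (PySem.Set.ofList peel)) (total + peel.length)
  termination_by papers.length
  decreasing_by
    rename_i hne
    show (PySem.Set.diff papers (PySem.Set.ofList peel)).length < papers.length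
    have hpe : peel = papers.filter (fun p =>
        decide ((NBR.countP (fun d => papers.contains (p.1 + d.1, p.2 + d.2)) : Int) < 4)) := by
      simp only [peel, List.unattach_filter, List.unattach_attach]
    have hne' : peel ≠ [] := by simpa [List.isEmpty_iff] using hne
    obtain ⟨x, hx⟩ := List.exists_mem_of_ne_nil peel hne'
    have hx' : x ∈ papers := (List.mem_filter.mp (hpe ▸ hx)).1
    have hxo : x ∈ PySem.Set.ofList peel := by rw [PySem.Set.mem_ofList]; exact hx
    simp only [PySem.Set.diff]
    refine length_filter_lt papers _ x hx' ?_
    simp [hxo]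

def total_removed_alt (grid : List String) : Int :=
  let w : Int := if grid.length ≠ 0 then PySem.Str.len grid.headI else 0
  let papers : PySem.Set (Int × Int) :=
    PySem.Set.ofList ((PySem.List.pyRange 0 (grid.length : Int)).flatMap (fun r =>
      ((PySem.List.pyRange 0 w).filter (fun c =>
        PySem.Str.pyGet? ((PySem.List.pyGet? grid r).getD "") c == some '@')).map (fun c => (r, c))))
  loopB papers 0

-- ===== PRECONDITION & SPEC =====
-- Pre_ excludes ragged grids where some row is shorter than the first row: there A (and B)
-- raise IndexError on row[c].
def Pre_total_removed (grid : List String) : Prop :=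
  ∀ s ∈ grid, PySem.Str.len grid.headI ≤ PySem.Str.len s
instance (grid : List String) : Decidable (Pre_total_removed grid) := by
  unfold Pre_total_removed; infer_instance

def pvWitness_total_removed : List String := ["@@@", "@@.", ".@@"]

def Spec_total_removed (grid : List String) (out : Int) : Prop := out = total_removed_alt grid
instance (grid : List String) (out : Int) : Decidable (Spec_total_removed grid out) := by
  unfold Spec_total_removed; infer_instance

-- ===== CLAIM (what is proved, stated in full; the proofs are below) =====
def Claim_equal_total_removed : Prop :=
  ∀ (grid : List String), Dom_total_removed grid → Pre_total_removed grid →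
    Spec_total_removed grid (total_removed grid)

-- ===== LEMMAS AND PROOFS =====

-- the 8-neighborhood of a cell, and the neighbor degree of a cell within a set S
def nbrSet (p : Int × Int) : List (Int × Int) := DIRS.map (fun d => (p.1 + d.1, p.2 + d.2))
def deg (S : List (Int × Int)) (p : Int × Int) : Nat :=
  (nbrSet p).countP (fun x => decide (x ∈ S))
-- a set is closed when every member keeps at least 4 neighbors inside it
def Closed (S : List (Int × Int)) : Prop := ∀ p ∈ S, 4 ≤ deg S p

lemma mem_nbrSet_symm (p x : Int × Int) : x ∈ nbrSet p ↔ p ∈ nbrSet x := by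
  simp [nbrSet, DIRS, Prod.ext_iff]
  omega

lemma nodup_nbrSet (p : Int × Int) : (nbrSet p).Nodup := by
  simp [nbrSet, DIRS, Prod.ext_iff]

lemma deg_mono {S T : List (Int × Int)} (h : ∀ x ∈ S, x ∈ T) (p : Int × Int) :
    deg S p ≤ deg T p := by
  apply List.countP_mono_left
  intro x _ hx
  simp only [decide_eq_true_eq] at hx ⊢
  exact h x hx

lemma countP_split {α : Type} (l : List α) (p q : α → Bool) :
    l.countP p = l.countP (fun x => p x && q x) + l.countP (fun x => p x && !q x) := by
  induction l with
  | nil => simp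
  | cons a l ih => by_cases h : p a <;> by_cases h2 : q a <;> simp [h, h2, ih] <;> omega

lemma deg_discard (S : List (Int × Int)) (pos p : Int × Int) (hpos : pos ∈ S) :
    (deg (PySem.Set.discard S pos) p : Int)
      = (deg S p : Int) - (if pos ∈ nbrSet p then 1 else 0) := by
  have h1 : deg (PySem.Set.discard S pos) p
      = (nbrSet p).countP (fun x => decide (x ∈ S) && !(x == pos)) := by
    apply List.countP_congr
    intro x _
    simp [PySem.Set.mem_discard]
  have h2 : (nbrSet p).countP (fun x => decide (x ∈ S) && (x == pos))
      = if pos ∈ nbrSet p then 1 else 0 := by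
    have heq : (nbrSet p).countP (fun x => decide (x ∈ S) && (x == pos))
        = (nbrSet p).countP (fun x => x == pos) := by
      apply List.countP_congr
      intro x _
      constructor
      · intro hx; simp at hx; simp [hx.2]
      · intro hx; simp at hx; subst hx; simp [hpos]
    rw [heq, ← List.count_eq_countP]
    by_cases hmem : pos ∈ nbrSet p
    · simp [hmem, List.count_eq_one_of_mem (nodup_nbrSet p) hmem]
    · simp [hmem, List.count_eq_zero.mpr hmem]
  have h3 := countP_split (nbrSet p) (fun x => decide (x ∈ S)) (fun x => x == pos)
  have e2 : deg S p = (nbrSet p).countP (fun x => decide (x ∈ S)) := rfl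
  rw [h1, e2]
  by_cases hmem : pos ∈ nbrSet p
  · rw [if_pos hmem]
    have h2' : (nbrSet p).countP (fun x => decide (x ∈ S) && (x == pos)) = 1 := by
      rw [h2, if_pos hmem]
    omega
  · rw [if_neg hmem]
    have h2' : (nbrSet p).countP (fun x => decide (x ∈ S) && (x == pos)) = 0 := by
      rw [h2, if_neg hmem]
    omega

-- ---- characterization of A's neighbor-update fold ----

lemma stepA_fold_spec (papers' : PySem.Set (Int × Int)) (pos : Int × Int) :
    ∀ (ds : List (Int × Int)) (cnt : PySem.Dict (Int × Int) Int) (q : List (Int × Int)),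
      (ds.map (fun d => (pos.1 + d.1, pos.2 + d.2))).Nodup →
      (∀ x, (ds.foldl (stepA papers' pos) (cnt, q)).1.getD x 0
          = if x ∈ ds.map (fun d => (pos.1 + d.1, pos.2 + d.2)) ∧ x ∈ papers'
            then cnt.getD x 0 - 1 else cnt.getD x 0)
      ∧ (∀ x, x ∈ (ds.foldl (stepA papers' pos) (cnt, q)).2
          ↔ x ∈ q ∨ (x ∈ ds.map (fun d => (pos.1 + d.1, pos.2 + d.2)) ∧ x ∈ papers'
                      ∧ cnt.getD x 0 - 1 < 4)) := by
  intro ds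
  induction ds with
  | nil => intro cnt q _; simp
  | cons d ds ih =>
    intro cnt q hnd
    rw [List.map_cons, List.nodup_cons] at hnd
    obtain ⟨hnb, hnd'⟩ := hnd
    set nb := (pos.1 + d.1, pos.2 + d.2) with hnbdef
    have hmapcons : ∀ x : Int × Int,
        x ∈ (d :: ds).map (fun d => (pos.1 + d.1, pos.2 + d.2))
          ↔ x = nb ∨ x ∈ ds.map (fun d => (pos.1 + d.1, pos.2 + d.2)) := by
      intro x
      simp only [List.map_cons, List.mem_cons, ← hnbdef]
    by_cases hm : nb ∈ papers'
    · have hc : papers'.contains nb = true := by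
        simpa [PySem.Set.contains_iff] using hm
      have hstep : stepA papers' pos (cnt, q) d
          = (cnt.modify nb 0 (· - 1),
             if cnt.getD nb 0 - 1 < 4 then q ++ [nb] else q) := by
        simp only [stepA, ← hnbdef, hc, if_true]
        rw [PySem.Dict.getD_modify_self]
        split <;> rfl
      obtain ⟨ih1, ih2⟩ := ih (cnt.modify nb 0 (· - 1))
        (if cnt.getD nb 0 - 1 < 4 then q ++ [nb] else q) hnd'
      have hmod : ∀ x : Int × Int, x ≠ nb →
          (cnt.modify nb 0 (· - 1)).getD x 0 = cnt.getD x 0 := by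
        intro x hx
        rw [PySem.Dict.getD_modify, if_neg hx]
      constructor
      · intro x
        rw [List.foldl_cons, hstep, ih1 x]
        by_cases hx : x = nb
        · subst hx
          rw [if_neg (fun hh => hnb hh.1), PySem.Dict.getD_modify_self,
            if_pos ⟨(hmapcons nb).mpr (Or.inl rfl), hm⟩]
        · rw [hmod x hx]
          by_cases hxs : x ∈ ds.map (fun d => (pos.1 + d.1, pos.2 + d.2)) ∧ x ∈ papers'
          · rw [if_pos hxs, if_pos ⟨(hmapcons x).mpr (Or.inr hxs.1), hxs.2⟩]
          · rw [if_neg hxs, if_neg (fun hh => hxs ⟨by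
              rcases (hmapcons x).mp hh.1 with h | h
              · exact absurd h hx
              · exact h, hh.2⟩)]
      · intro x
        rw [List.foldl_cons, hstep, ih2 x]
        by_cases hx : x = nb
        · subst hx
          have hmodself := PySem.Dict.getD_modify_self (d := cnt) (k := nb) (d0 := (0 : Int))
            (f := (· - 1))
          rw [hmodself]
          constructor
          · rintro (hq | hds)
            · split at hq
              · rcases List.mem_append.mp hq with h | h
                · exact Or.inl h
                · rename_i hlt
                  exact Or.inr ⟨(hmapcons nb).mpr (Or.inl rfl), hm, hlt⟩
              · exact Or.inl hq
            · exact absurd hds.1 hnb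
          · rintro (hq | ⟨_, _, hlt⟩)
            · split <;> simp [hq]
            · left; rw [if_pos hlt]; simp
        · rw [hmod x hx]
          have hq1 : x ∈ (if cnt.getD nb 0 - 1 < 4 then q ++ [nb] else q) ↔ x ∈ q := by
            split <;> simp [hx]
          rw [hq1]
          constructor
          · rintro (hq | ⟨hds, hmm, hlt⟩)
            · exact Or.inl hq
            · exact Or.inr ⟨(hmapcons x).mpr (Or.inr hds), hmm, hlt⟩
          · rintro (hq | ⟨hds, hmm, hlt⟩)
            · exact Or.inl hq
            · rcases (hmapcons x).mp hds with h | h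
              · exact absurd h hx
              · exact Or.inr ⟨h, hmm, hlt⟩
    · have hc : papers'.contains nb = false := by
        rw [← Bool.not_eq_true, PySem.Set.contains_iff]; exact hm
      have hstep : stepA papers' pos (cnt, q) d = (cnt, q) := by
        simp only [stepA, ← hnbdef, hc, if_false, Bool.false_eq_true]
      obtain ⟨ih1, ih2⟩ := ih cnt q hnd'
      have hcond : ∀ x : Int × Int,
          (x ∈ (d :: ds).map (fun d => (pos.1 + d.1, pos.2 + d.2)) ∧ x ∈ papers')
            ↔ (x ∈ ds.map (fun d => (pos.1 + d.1, pos.2 + d.2)) ∧ x ∈ papers') := by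
        intro x
        constructor
        · rintro ⟨hds, hmm⟩
          rcases (hmapcons x).mp hds with h | h
          · exact absurd (h ▸ hmm) hm
          · exact ⟨h, hmm⟩
        · rintro ⟨hds, hmm⟩
          exact ⟨(hmapcons x).mpr (Or.inr hds), hmm⟩
      constructor
      · intro x
        rw [List.foldl_cons, hstep, ih1 x]
        by_cases hxs : x ∈ ds.map (fun d => (pos.1 + d.1, pos.2 + d.2)) ∧ x ∈ papers'
        · rw [if_pos hxs, if_pos ((hcond x).mpr hxs)]
        · rw [if_neg hxs, if_neg (fun hh => hxs ((hcond x).mp hh))]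
      · intro x
        rw [List.foldl_cons, hstep, ih2 x]
        constructor
        · rintro (hq | ⟨hds, hmm, hlt⟩)
          · exact Or.inl hq
          · exact Or.inr ⟨((hcond x).mpr ⟨hds, hmm⟩).1, hmm, hlt⟩
        · rintro (hq | ⟨hds, hmm, hlt⟩)
          · exact Or.inl hq
          · exact Or.inr ⟨((hcond x).mp ⟨hds, hmm⟩).1, hmm, hlt⟩


lemma length_discard_of_mem {S : List (Int × Int)} {pos : Int × Int}
    (hnd : S.Nodup) (hmem : pos ∈ S) :
    (PySem.Set.discard S pos).length + 1 = S.length := by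
  have h1 := List.length_eq_length_filter_add (l := S) (fun y => !(y == pos))
  have h2 : S.filter (fun y => !!(y == pos)) = S.filter (fun y => y == pos) := by
    simp
  have h3 : (S.filter (fun y => y == pos)).length = 1 := by
    rw [← List.countP_eq_length_filter, ← List.count_eq_countP,
      List.count_eq_one_of_mem hnd hmem]
  unfold PySem.Set.discard
  rw [h2] at h1
  omega

structure InvA (papers : PySem.Set (Int × Int)) (cnt : PySem.Dict (Int × Int) Int)
    (q : List (Int × Int)) : Prop where
  nodup : papers.Nodup
  cnt_eq : ∀ p ∈ papers, cnt.getD p 0 = (deg papers p : Int)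
  queue : ∀ p ∈ papers, deg papers p < 4 → p ∈ q

lemma loopA_step_skip1 (papers : PySem.Set (Int × Int)) (cnt : PySem.Dict (Int × Int) Int)
    (removed : Int) (pos : Int × Int) (q' : List (Int × Int))
    (hc : papers.contains pos = false) :
    loopA papers cnt (pos :: q') removed = loopA papers cnt q' removed := by
  rw [loopA, dif_pos hc]

lemma loopA_step_skip2 (papers : PySem.Set (Int × Int)) (cnt : PySem.Dict (Int × Int) Int)
    (removed : Int) (pos : Int × Int) (q' : List (Int × Int))
    (hc : ¬ papers.contains pos = false) (hge : 4 ≤ cnt.getD pos 0) :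
    loopA papers cnt (pos :: q') removed = loopA papers cnt q' removed := by
  rw [loopA, dif_neg hc, if_pos hge]

lemma loopA_step_rm (papers : PySem.Set (Int × Int)) (cnt : PySem.Dict (Int × Int) Int)
    (removed : Int) (pos : Int × Int) (q' : List (Int × Int))
    (hc : ¬ papers.contains pos = false) (hlt : ¬ 4 ≤ cnt.getD pos 0) :
    loopA papers cnt (pos :: q') removed
      = loopA ((PySem.Set.remove? papers pos).getD papers)
          (DIRS.foldl (stepA ((PySem.Set.remove? papers pos).getD papers) pos) (cnt, q')).1
          (DIRS.foldl (stepA ((PySem.Set.remove? papers pos).getD papers) pos) (cnt, q')).2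
          (removed + 1) := by
  rw [loopA, dif_neg hc, if_neg hlt]

lemma loopA_run : ∀ (n : Nat) (papers : PySem.Set (Int × Int)) (cnt : PySem.Dict (Int × Int) Int)
    (q : List (Int × Int)) (removed : Int), 9 * papers.length + q.length ≤ n → InvA papers cnt q →
    ∃ F : List (Int × Int), F.Sublist papers ∧ Closed F ∧
      (∀ C, Closed C → (∀ x ∈ C, x ∈ papers) → ∀ x ∈ C, x ∈ F) ∧
      loopA papers cnt q removed = removed + ((papers.length : Int) - (F.length : Int)) := by
  intro n
  induction n using Nat.strong_induction_on with
  | _ n ih =>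
  intro papers cnt q removed hn hinv
  match q with
  | [] =>
    refine ⟨papers, List.Sublist.refl _, ?_, fun C _ hsub => hsub, by rw [loopA]; ring⟩
    intro p hp
    by_contra hlt
    exact absurd (hinv.queue p hp (by omega)) (List.not_mem_nil)
  | pos :: q' =>
    by_cases hc : papers.contains pos = false
    · have hpos : pos ∉ papers := by
        intro hmem
        rw [(PySem.Set.contains_iff papers pos).mpr hmem] at hc
        cases hc
      have hinv' : InvA papers cnt q' :=
        ⟨hinv.nodup, hinv.cnt_eq, fun p hp hd => by
          rcases List.mem_cons.mp (hinv.queue p hp hd) with h | h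
          · exact absurd (h ▸ hp) hpos
          · exact h⟩
      have hn' : 9 * papers.length + q'.length < n := by
        simp only [List.length_cons] at hn; omega
      obtain ⟨F, h1, h2, h3, h4⟩ := ih _ hn' papers cnt q' removed (le_refl _) hinv'
      exact ⟨F, h1, h2, h3, by rw [loopA_step_skip1 papers cnt removed pos q' hc]; exact h4⟩
    · have hpos : pos ∈ papers := by
        rw [← PySem.Set.contains_iff]
        revert hc
        cases papers.contains pos <;> simp
      by_cases hge : 4 ≤ cnt.getD pos 0
      · have hdpos : 4 ≤ deg papers pos := by
          have := hinv.cnt_eq pos hpos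
          omega
        have hinv' : InvA papers cnt q' :=
          ⟨hinv.nodup, hinv.cnt_eq, fun p hp hd => by
            rcases List.mem_cons.mp (hinv.queue p hp hd) with h | h
            · subst h; omega
            · exact h⟩
        have hn' : 9 * papers.length + q'.length < n := by
          simp only [List.length_cons] at hn; omega
        obtain ⟨F, h1, h2, h3, h4⟩ := ih _ hn' papers cnt q' removed (le_refl _) hinv'
        exact ⟨F, h1, h2, h3, by
          rw [loopA_step_skip2 papers cnt removed pos q' hc hge]; exact h4⟩
      · have hdpos : deg papers pos < 4 := by
          have := hinv.cnt_eq pos hpos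
          omega
        have hrm : (papers.remove? pos).getD papers = PySem.Set.discard papers pos := by
          rw [PySem.Set.remove?_of_mem hpos]; rfl
        have hmem' : ∀ x, x ∈ (papers.remove? pos).getD papers ↔ x ∈ papers ∧ x ≠ pos := by
          intro x; rw [hrm]; exact PySem.Set.mem_discard papers pos x
        have hnd' : ((papers.remove? pos).getD papers).Nodup := by
          rw [hrm]; exact List.Nodup.sublist List.filter_sublist hinv.nodup
        have hlen : ((papers.remove? pos).getD papers).length + 1 = papers.length := by
          rw [hrm]; exact length_discard_of_mem hinv.nodup hpos
        have hmapnd : (DIRS.map (fun d => (pos.1 + d.1, pos.2 + d.2))).Nodup := nodup_nbrSet pos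
        obtain ⟨hf1, hf2⟩ :=
          stepA_fold_spec ((papers.remove? pos).getD papers) pos DIRS cnt q' hmapnd
        have hdeg' : ∀ p, (deg ((papers.remove? pos).getD papers) p : Int)
            = (deg papers p : Int) - (if pos ∈ nbrSet p then 1 else 0) := by
          intro p; rw [hrm]; exact deg_discard papers pos p hpos
        have hinv' : InvA ((papers.remove? pos).getD papers)
            (List.foldl (stepA ((papers.remove? pos).getD papers) pos) (cnt, q') DIRS).1
            (List.foldl (stepA ((papers.remove? pos).getD papers) pos) (cnt, q') DIRS).2 := by
          refine ⟨hnd', ?_, ?_⟩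
          · intro p hp
            have hpmem : p ∈ papers := ((hmem' p).mp hp).1
            have hcnt := hinv.cnt_eq p hpmem
            rw [hf1 p]
            by_cases hnp : p ∈ nbrSet pos
            · rw [if_pos ⟨hnp, hp⟩, hcnt, hdeg' p,
                if_pos ((mem_nbrSet_symm pos p).mp hnp)]
            · rw [if_neg (fun hh => hnp hh.1), hcnt, hdeg' p,
                if_neg (fun hh => hnp ((mem_nbrSet_symm p pos).mp hh))]
              ring
          · intro p hp hd
            have hpmem : p ∈ papers := ((hmem' p).mp hp).1
            have hpne : p ≠ pos := ((hmem' p).mp hp).2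
            rw [hf2 p]
            by_cases hnp : p ∈ nbrSet pos
            · refine Or.inr ⟨hnp, hp, ?_⟩
              have hdd := hdeg' p
              rw [if_pos ((mem_nbrSet_symm pos p).mp hnp)] at hdd
              have hcnt := hinv.cnt_eq p hpmem
              omega
            · have hdd : (deg ((papers.remove? pos).getD papers) p : Int)
                  = (deg papers p : Int) := by
                rw [hdeg' p, if_neg (fun hh => hnp ((mem_nbrSet_symm p pos).mp hh))]
                ring
              have hdp : deg papers p < 4 := by omega
              rcases List.mem_cons.mp (hinv.queue p hpmem hdp) with h | h
              · exact absurd h hpne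
              · exact Or.inl h
        have hqlen : (List.foldl (stepA ((papers.remove? pos).getD papers) pos) (cnt, q') DIRS).2.length
            ≤ q'.length + DIRS.length :=
          stepA_snd_len ((papers.remove? pos).getD papers) pos DIRS (cnt, q')
        have hdl : DIRS.length = 8 := rfl
        have hn' : 9 * ((papers.remove? pos).getD papers).length
            + (List.foldl (stepA ((papers.remove? pos).getD papers) pos) (cnt, q') DIRS).2.length
            < n := by
          simp only [List.length_cons] at hn
          omega
        obtain ⟨F, h1, h2, h3, h4⟩ := ih _ hn' _ _ _ (removed + 1) (le_refl _) hinv'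
        refine ⟨F, ?_, h2, ?_, ?_⟩
        · refine h1.trans ?_
          rw [hrm]
          exact List.filter_sublist
        · intro C hC hCsub x hx
          refine h3 C hC ?_ x hx
          intro y hy
          rw [hmem' y]
          refine ⟨hCsub y hy, ?_⟩
          intro hyp
          subst hyp
          have hm1 := deg_mono hCsub y
          have hm2 := hC y hy
          omega
        · rw [loopA_step_rm papers cnt removed pos q' hc hge, h4]
          have hfl : F.length ≤ ((papers.remove? pos).getD papers).length :=
            List.Sublist.length_le h1
          omega


-- ---- characterization of B's round loop ----

def predB (papers : PySem.Set (Int × Int)) (p : Int × Int) : Bool :=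
  decide ((NBR.countP (fun d => papers.contains (p.1 + d.1, p.2 + d.2)) : Int) < 4)

lemma contains_eq_decide_mem (S : PySem.Set (Int × Int)) (x : Int × Int) :
    S.contains x = decide (x ∈ S) := by
  by_cases h : x ∈ S
  · simp only [(PySem.Set.contains_iff S x).mpr h, h, decide_true]
  · simp only [h, decide_false]
    rw [← Bool.not_eq_true, PySem.Set.contains_iff]
    exact h

lemma predB_iff (S : PySem.Set (Int × Int)) (p : Int × Int) :
    predB S p = true ↔ deg S p < 4 := by
  have hN : NBR = DIRS := by decide
  have hcnt : NBR.countP (fun d => S.contains (p.1 + d.1, p.2 + d.2)) = deg S p := by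
    rw [hN]
    unfold deg nbrSet
    rw [List.countP_map]
    apply List.countP_congr
    intro d _
    rw [contains_eq_decide_mem]
    exact Iff.rfl
  unfold predB
  rw [hcnt]
  simp

lemma loopB_eq (papers : PySem.Set (Int × Int)) (total : Int) :
    loopB papers total =
      if (papers.filter (predB papers)).isEmpty then total
      else loopB (PySem.Set.diff papers (PySem.Set.ofList (papers.filter (predB papers))))
             (total + (papers.filter (predB papers)).length) := by
  rw [loopB]
  rfl

lemma loopB_run : ∀ (n : Nat) (papers : PySem.Set (Int × Int)) (total : Int),
    papers.length ≤ n →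
    ∃ F : List (Int × Int), F.Sublist papers ∧ Closed F ∧
      (∀ C, Closed C → (∀ x ∈ C, x ∈ papers) → ∀ x ∈ C, x ∈ F) ∧
      loopB papers total = total + ((papers.length : Int) - (F.length : Int)) := by
  intro n
  induction n using Nat.strong_induction_on with
  | _ n ih =>
  intro papers total hn
  by_cases hstop : (papers.filter (predB papers)).isEmpty = true
  · refine ⟨papers, List.Sublist.refl _, ?_, fun C _ hsub => hsub, by
      rw [loopB_eq, if_pos hstop]; ring⟩
    intro p hp
    rw [List.isEmpty_iff, List.filter_eq_nil_iff] at hstop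
    have hpb := hstop p hp
    rw [predB_iff] at hpb
    omega
  · have hpe2 : papers.filter (fun x => !(PySem.Set.ofList (papers.filter (predB papers))).contains x)
        = papers.filter (fun x => !(predB papers x)) := by
      apply List.filter_congr
      intro x hx
      congr 1
      rw [contains_eq_decide_mem]
      by_cases hp : predB papers x = true
      · simp [PySem.Set.mem_ofList, List.mem_filter, hx, hp]
      · simp only [Bool.not_eq_true] at hp
        simp [PySem.Set.mem_ofList, List.mem_filter, hp]
    have hlen := List.length_eq_length_filter_add (l := papers) (predB papers)
    have hdiff : PySem.Set.diff papers (PySem.Set.ofList (papers.filter (predB papers)))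
        = papers.filter (fun x => !(predB papers x)) := by
      unfold PySem.Set.diff
      exact hpe2
    have hnonempty : 0 < (papers.filter (predB papers)).length := by
      have hne2 : papers.filter (predB papers) ≠ [] := by
        intro hh
        rw [List.isEmpty_iff] at hstop
        exact hstop hh
      rcases List.exists_mem_of_ne_nil _ hne2 with ⟨x, hx⟩
      exact List.length_pos_of_mem hx
    have hn' : (papers.filter (fun x => !(predB papers x))).length < n := by
      have := List.Sublist.length_le (List.filter_sublist (l := papers)
        (p := fun x => !(predB papers x)))
      omega
    obtain ⟨F, h1, h2, h3, h4⟩ := ih _ (by omega) (papers.filter (fun x => !(predB papers x)))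
      (total + (papers.filter (predB papers)).length) (le_refl _)
    refine ⟨F, h1.trans List.filter_sublist, h2, ?_, ?_⟩
    · intro C hC hCsub x hx
      refine h3 C hC ?_ x hx
      intro y hy
      rw [List.mem_filter]
      refine ⟨hCsub y hy, ?_⟩
      have hm1 := deg_mono hCsub y
      have hm2 := hC y hy
      simp only [Bool.not_eq_true']
      rw [← Bool.not_eq_true, predB_iff]
      omega
    · rw [loopB_eq, if_neg hstop, hdiff, h4]
      omega


-- ---- the initial state of both programs: the row-major list of '@' cells ----

def gridList (grid : List String) (w : Int) : List (Int × Int) :=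
  (PySem.List.pyRange 0 (grid.length : Int)).flatMap (fun r =>
    ((PySem.List.pyRange 0 w).filter (fun c =>
      PySem.Str.pyGet? ((PySem.List.pyGet? grid r).getD "") c == some '@')).map (fun c => (r, c)))

lemma nodup_pyRange0 (b : Int) : (PySem.List.pyRange 0 b).Nodup := by
  by_cases hb : 0 ≤ b
  · obtain ⟨m, rfl⟩ : ∃ m : Nat, b = (m : Int) := ⟨b.toNat, (Int.toNat_of_nonneg hb).symm⟩
    rw [PySem.List.pyRange_zero_natCast]
    exact List.Nodup.map (fun a b => Int.natCast_inj.mp) List.nodup_range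
  · have hnil : PySem.List.pyRange 0 b = [] := by
      rw [List.eq_nil_iff_forall_not_mem]
      intro x hx
      rw [PySem.List.mem_pyRange_one] at hx
      omega
    rw [hnil]
    exact List.nodup_nil

lemma nodup_gridList (grid : List String) (w : Int) : (gridList grid w).Nodup := by
  unfold gridList
  rw [List.nodup_flatMap]
  constructor
  · intro r _
    exact List.Nodup.map (fun a b hab => congrArg Prod.snd hab)
      (List.Nodup.filter _ (nodup_pyRange0 w))
  · have hnd := nodup_pyRange0 (grid.length : Int)
    refine List.Pairwise.imp ?_ hnd
    intro a b hab x hxa hxb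
    simp only [List.mem_map, List.mem_filter] at hxa hxb
    obtain ⟨ca, _, hca⟩ := hxa
    obtain ⟨cb, _, hcb⟩ := hxb
    exact hab (congrArg Prod.fst (hca.trans hcb.symm))

lemma foldl_update_flatMap (l : List Int) (g : Int → List (Int × Int)) (s : PySem.Set (Int × Int)) :
    l.foldl (fun pap r => PySem.Set.update pap (g r)) s = PySem.Set.update s (l.flatMap g) := by
  induction l generalizing s with
  | nil => simp [PySem.Set.update_nil]
  | cons r l ihh =>
    rw [List.foldl_cons, List.flatMap_cons, PySem.Set.update_append]
    exact ihh _

lemma buildA_eq (grid : List String) (w : Int) :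
    ((PySem.List.pyRange 0 (grid.length : Int)).foldl (fun pap r =>
      let row := (PySem.List.pyGet? grid r).getD ""
      (PySem.List.pyRange 0 w).foldl (fun pap c =>
        if PySem.Str.pyGet? row c == some '@' then PySem.Set.add pap (r, c) else pap) pap)
      PySem.Set.empty)
    = PySem.Set.ofList (gridList grid w) := by
  have hfun : (fun (pap : PySem.Set (Int × Int)) (r : Int) =>
      let row := (PySem.List.pyGet? grid r).getD ""
      (PySem.List.pyRange 0 w).foldl (fun pap c =>
        if PySem.Str.pyGet? row c == some '@' then PySem.Set.add pap (r, c) else pap) pap)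
      = (fun pap r => PySem.Set.update pap (((PySem.List.pyRange 0 w).filter (fun c =>
          PySem.Str.pyGet? ((PySem.List.pyGet? grid r).getD "") c == some '@')).map
            (fun c => (r, c)))) := by
    funext pap r
    show (PySem.List.pyRange 0 w).foldl (fun pap c =>
        if PySem.Str.pyGet? ((PySem.List.pyGet? grid r).getD "") c == some '@'
        then PySem.Set.add pap (r, c) else pap) pap = _
    rw [PySem.List.foldl_if_eq_foldl_filter
      (p := fun c => PySem.Str.pyGet? ((PySem.List.pyGet? grid r).getD "") c == some '@')
      (f := fun pap c => PySem.Set.add pap (r, c)),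
      PySem.Set.update_map_eq_foldl_add]
  rw [hfun, foldl_update_flatMap, PySem.Set.update_empty]
  rfl

-- ---- the initial neighbor-count dict and queue of A ----

lemma fA_eq_deg (papers : PySem.Set (Int × Int)) (pp : Int × Int) :
    DIRS.foldl (fun cnt dd =>
      if papers.contains (pp.1 + dd.1, pp.2 + dd.2) then cnt + 1 else cnt) (0 : Int)
    = (deg papers pp : Int) := by
  have h := PySem.List.foldl_if_add_one
    (fun dd : Int × Int => papers.contains (pp.1 + dd.1, pp.2 + dd.2)) DIRS (0 : Int)
  rw [h, zero_add]
  congr 1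
  unfold deg nbrSet
  rw [List.countP_map]
  apply List.countP_congr
  intro d _
  simp only [Function.comp]
  rw [contains_eq_decide_mem]

lemma cnt0_items (papers : PySem.Set (Int × Int)) (hnd : papers.Nodup) :
    (papers.foldl (fun d p =>
      d.insert p (DIRS.foldl (fun cnt dd =>
        if papers.contains (p.1 + dd.1, p.2 + dd.2) then cnt + 1 else cnt) (0 : Int)))
      PySem.Dict.empty).items
    = papers.map (fun p => (p, (deg papers p : Int))) := by
  have h := PySem.Dict.items_foldl_insert_fresh papers (fun p => p)
    (fun p => DIRS.foldl (fun cnt dd =>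
      if papers.contains (p.1 + dd.1, p.2 + dd.2) then cnt + 1 else cnt) (0 : Int))
    PySem.Dict.empty (fun a _ => PySem.Dict.contains_empty a) (by simpa using hnd)
  rw [h, show (PySem.Dict.empty : PySem.Dict (Int × Int) Int).items = [] from rfl,
    List.nil_append]
  apply List.map_congr_left
  intro p _
  show (p, DIRS.foldl (fun cnt dd =>
    if papers.contains (p.1 + dd.1, p.2 + dd.2) then cnt + 1 else cnt) (0 : Int)) = _
  rw [fA_eq_deg]

lemma cnt0_keys_nodup (papers : PySem.Set (Int × Int)) :
    (papers.foldl (fun d p =>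
      d.insert p (DIRS.foldl (fun cnt dd =>
        if papers.contains (p.1 + dd.1, p.2 + dd.2) then cnt + 1 else cnt) (0 : Int)))
      PySem.Dict.empty).keys.Nodup := by
  exact PySem.Dict.nodup_keys_foldl_insert papers _ PySem.Dict.empty (by
    rw [show (PySem.Dict.empty : PySem.Dict (Int × Int) Int).keys = [] from rfl]
    exact List.nodup_nil)

lemma inv0 (papers : PySem.Set (Int × Int)) (hnd : papers.Nodup) :
    InvA papers
      (papers.foldl (fun d p =>
        d.insert p (DIRS.foldl (fun cnt dd =>
          if papers.contains (p.1 + dd.1, p.2 + dd.2) then cnt + 1 else cnt) (0 : Int)))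
        PySem.Dict.empty)
      (((papers.foldl (fun d p =>
        d.insert p (DIRS.foldl (fun cnt dd =>
          if papers.contains (p.1 + dd.1, p.2 + dd.2) then cnt + 1 else cnt) (0 : Int)))
        PySem.Dict.empty).items.filter (fun pc => pc.2 < 4)).map Prod.fst) := by
  have hgetD : ∀ p ∈ papers,
      (papers.foldl (fun d p =>
        d.insert p (DIRS.foldl (fun cnt dd =>
          if papers.contains (p.1 + dd.1, p.2 + dd.2) then cnt + 1 else cnt) (0 : Int)))
        PySem.Dict.empty).getD p 0 = (deg papers p : Int) := by
    intro p hp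
    apply PySem.Dict.getD_of_mem_items
    · rw [cnt0_items papers hnd]
      exact List.mem_map.mpr ⟨p, hp, rfl⟩
    · exact cnt0_keys_nodup papers
  refine ⟨hnd, hgetD, ?_⟩
  intro p hp hdp
  apply List.mem_map.mpr
  refine ⟨(p, (deg papers p : Int)), ?_, rfl⟩
  rw [List.mem_filter, cnt0_items papers hnd]
  refine ⟨List.mem_map.mpr ⟨p, hp, rfl⟩, ?_⟩
  simp only [decide_eq_true_eq]
  omega


-- ---- both loops compute |L| - |core L|: the final sets coincide by double inclusion ----

lemma key_loops_eq (L : PySem.Set (Int × Int)) (hnd : L.Nodup) :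
    loopA L
      (L.foldl (fun d p =>
        d.insert p (DIRS.foldl (fun cnt dd =>
          if L.contains (p.1 + dd.1, p.2 + dd.2) then cnt + 1 else cnt) (0 : Int)))
        PySem.Dict.empty)
      (((L.foldl (fun d p =>
        d.insert p (DIRS.foldl (fun cnt dd =>
          if L.contains (p.1 + dd.1, p.2 + dd.2) then cnt + 1 else cnt) (0 : Int)))
        PySem.Dict.empty).items.filter (fun pc => pc.2 < 4)).map Prod.fst) 0
    = loopB L 0 := by
  obtain ⟨FA, ha1, ha2, ha3, ha4⟩ := loopA_run _ L _ _ 0 (le_refl _) (inv0 L hnd)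
  obtain ⟨FB, hb1, hb2, hb3, hb4⟩ := loopB_run L.length L 0 (le_refl _)
  have ndA : FA.Nodup := List.Nodup.sublist ha1 hnd
  have ndB : FB.Nodup := List.Nodup.sublist hb1 hnd
  have hperm : FA.Perm FB := (List.perm_ext_iff_of_nodup ndA ndB).mpr (fun a =>
    ⟨fun h => hb3 FA ha2 (fun x hx => ha1.subset hx) a h,
     fun h => ha3 FB hb2 (fun x hx => hb1.subset hx) a h⟩)
  rw [ha4, hb4, hperm.length_eq]

lemma alt_eq (grid : List String) :
    total_removed_alt grid
      = loopB (PySem.Set.ofList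
          (gridList grid (if grid.length ≠ 0 then PySem.Str.len grid.headI else 0))) 0 := rfl

-- ===== VERDICT (by name: the statement is the Claim_ definition above) =====
theorem total_removed_spec : Claim_equal_total_removed := by
  intro grid _ _
  unfold Spec_total_removed
  rw [alt_eq]
  simp only [total_removed]
  rw [buildA_eq grid (if grid.length ≠ 0 then PySem.Str.len grid.headI else 0),
    PySem.Set.ofList_eq_self_of_nodup _
      (nodup_gridList grid (if grid.length ≠ 0 then PySem.Str.len grid.headI else 0))]
  exact key_loops_eq _ (nodup_gridList grid _)
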